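-- pv_equiv track=rewrite | github.com/MarcoCiaramella/exp-opt | exp-opt.py | get_exprs
-- ===== SOURCE A (Python) =====
-- import itertools
--
-- def comb(vals, size):
--     return list(itertools.product(vals, repeat=size))
--
-- def evaluate(expr):
--
--   if len(expr) == 3:
--     return [' '.join(expr)]
--
--   res = []
--   i = 1
--   while i < len(expr):
--     expr2 = expr[:i-1] + [f'({expr[i-1]} {expr[i]} {expr[i+1]})'] + expr[i+2:]
--     res += [' '.join(expr2)]
--     res += evaluate(expr2)
--     i += 2
--   return res
--
-- def get_exprs(operators, operands, num_ops):
--   res = []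
--   for ops in comb(operators, num_ops):
--     for opers in comb(operands, num_ops+1):
--       i = 0
--       expr = [opers[i]]
--       for op in ops:
--         expr.append(op)
--         i += 1
--         expr.append(opers[i])
--       # dato un insieme di operatori e di operandi evaluate restituisce tutte le combinazioni possibili incluse le parentesi
--       res += evaluate(expr)
--   return res
-- ===== SOURCE B (Python) =====
-- # Same result as A, but the recursive `evaluate` is replaced by an explicit
-- # LIFO work stack of ('emit', string) / ('eval', node) frames (iterative DFS).
-- import itertools
--
-- def comb(vals, size):
--     return list(itertools.product(vals, repeat=size))
--
-- def get_exprs(operators, operands, num_ops):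
--   res = []
--   for ops in comb(operators, num_ops):
--     for opers in comb(operands, num_ops + 1):
--       i = 0
--       expr = [opers[i]]
--       for op in ops:
--         expr.append(op)
--         i += 1
--         expr.append(opers[i])
--       stack = [('eval', expr)]
--       while stack:
--         kind, e = stack.pop()
--         if kind == 'emit':
--           res.append(e)
--         elif len(e) == 3:
--           res.append(' '.join(e))
--         else:
--           for j in reversed(range(1, len(e), 2)):
--             c = e[:j-1] + ['({} {} {})'.format(e[j-1], e[j], e[j+1])] + e[j+2:]
--             stack.append(('eval', c))
--             stack.append(('emit', ' '.join(c)))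
--   return res
-- ===== Notes on version B (the rewrite author's own statement) =====
-- stated objective: alternative
-- what changed: A's recursive evaluate is replaced by an iterative pre-order DFS driven by an explicit LIFO stack of ('emit', string)/('eval', node) frames, pushed in reverse so expansions pop in source order; the outer enumeration of operator/operand tuples is unchanged; Pre_ excludes num_ops < 0, where both programs raise ValueError in itertools.product.
import Mathlib
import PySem

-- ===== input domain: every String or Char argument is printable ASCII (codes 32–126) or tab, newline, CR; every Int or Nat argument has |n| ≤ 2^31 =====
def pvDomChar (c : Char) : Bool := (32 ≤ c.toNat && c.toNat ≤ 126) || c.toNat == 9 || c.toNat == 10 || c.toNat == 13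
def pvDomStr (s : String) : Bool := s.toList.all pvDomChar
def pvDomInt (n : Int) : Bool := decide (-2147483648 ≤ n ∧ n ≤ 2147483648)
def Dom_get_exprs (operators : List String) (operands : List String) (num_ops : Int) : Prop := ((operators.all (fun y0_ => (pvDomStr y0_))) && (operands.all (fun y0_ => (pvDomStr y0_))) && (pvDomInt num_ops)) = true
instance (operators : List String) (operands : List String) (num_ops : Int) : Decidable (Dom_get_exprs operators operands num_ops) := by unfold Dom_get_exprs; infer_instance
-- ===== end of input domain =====

-- B replaces A's recursive `evaluate` by an iterative pre-order DFS over an explicit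
-- LIFO work stack of emit/eval frames; the outer enumeration is unchanged.

-- ===== PORT A =====

-- shared helpers (identical lines of both Pythons): itertools.product(vals, repeat=size),
-- the interleaved expr construction, ' '.join, and the expr2 node constructor.

-- itertools.product(vals, repeat=n), leftmost factor varying slowest
def combP (vals : List String) : Nat → List (List String)
  | 0 => [[]]
  | n + 1 => vals.flatMap (fun v => (combP vals n).map (v :: ·))

-- comb(vals, size); size < 0 raises ValueError in Python and is excluded by Pre_, so .toNat is exact
def comb (vals : List String) (size : Int) : List (List String) := combP vals size.toNat

-- ' '.join(expr)
def joinSp (l : List String) : String := PySem.Str.join " " l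

-- f'({x} {y} {z})'
def paren3 (x y z : String) : String := PySem.Str.join "" ["(", x, " ", y, " ", z, ")"]

-- expr2 = expr[:j-1] + [f'({expr[j-1]} {expr[j]} {expr[j+1]})'] + expr[j+2:]
-- (used with 1 ≤ j < len expr, where the three indices are in range, so pyGetD is exact)
def mkChild (e : List String) (j : Int) : List String :=
  PySem.List.slice e none (some (j - 1))
    ++ [paren3 (PySem.List.pyGetD e (j - 1) "") (PySem.List.pyGetD e j "") (PySem.List.pyGetD e (j + 1) "")]
    ++ PySem.List.slice e (some (j + 2)) none

-- the interleaved expr: i = 0; expr = [opers[i]]; for op in ops: append op; i += 1; append opers[i]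
-- (in get_exprs, len opers = len ops + 1, so every index is in range and pyGetD is exact)
def buildExpr (ops opers : List String) : List String :=
  (ops.foldl (fun (st : Int × List String) op =>
      (st.1 + 1, st.2 ++ [op, PySem.List.pyGetD opers (st.1 + 1) ""]))
    (0, [PySem.List.pyGetD opers 0 ""])).2

-- evaluate(expr) of A; the `while i < len(expr): … i += 2` loop is the fold over
-- range(1, len(expr), 2); fuel is only a structural-termination guard (each recursive
-- call is on a strictly shorter node, so fuel len(e)+1 is never exhausted)
def evalAF : Nat → List String → List String
  | 0, _ => []
  | f + 1, e =>
    if e.length == 3 then [joinSp e]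
    else
      (PySem.List.pyRange 1 (e.length : Int) 2).foldl
        (fun res j => res ++ ([joinSp (mkChild e j)] ++ evalAF f (mkChild e j))) []

def evalA (e : List String) : List String := evalAF (e.length + 1) e

-- get_exprs, port of A
def get_exprs (operators : List String) (operands : List String) (num_ops : Int) : List String :=
  (comb operators num_ops).foldl (fun res ops =>
    (comb operands (num_ops + 1)).foldl (fun res opers =>
      res ++ evalA (buildExpr ops opers)) res) []

-- ===== PORT B =====

-- the work-stack frames of Source B: ('emit', s) / ('eval', e)
inductive WorkFrame
  | emit : String → WorkFrame
  | eval : List String → WorkFrame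

-- fuel bound for the stack loop: wfW n bounds the number of pops an eval frame of a
-- size-n node can cause (proved below: each pop strictly decreases stackW)
def wfW : Nat → Nat
  | 0 => 1
  | n + 1 => (n + 1) * (wfW n + 1) + 1

def frameW : WorkFrame → Nat
  | .emit _ => 1
  | .eval e => wfW e.length

def stackW (st : List WorkFrame) : Nat := (st.map frameW).sum

-- the `while stack:` loop of Source B: pop a frame; 'emit' appends its string, 'eval' of a
-- size-3 node emits its join, any other 'eval' pushes (eval, emit) pairs for its
-- children in reverse order so they pop left-to-right; fuel is only a
-- structural-termination guard (stackW stack pops always suffice, proved below)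
def runStackF : Nat → List WorkFrame → List String → List String
  | 0, _, res => res
  | f + 1, stack, res =>
    match stack with
    | [] => res
    | .emit s :: rest => runStackF f rest (res ++ [s])
    | .eval e :: rest =>
      if e.length == 3 then runStackF f rest (res ++ [joinSp e])
      else
        runStackF f ((PySem.List.pyRange 1 (e.length : Int) 2).reverse.foldl
          (fun st j => WorkFrame.emit (joinSp (mkChild e j)) :: WorkFrame.eval (mkChild e j) :: st) rest) res

-- get_exprs, port of B (Source B): same enumeration, stack-driven expansion
def get_exprs_alt (operators : List String) (operands : List String) (num_ops : Int) : List String :=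
  (comb operators num_ops).foldl (fun res ops =>
    (comb operands (num_ops + 1)).foldl (fun res opers =>
      runStackF (stackW [WorkFrame.eval (buildExpr ops opers)])
        [WorkFrame.eval (buildExpr ops opers)] res) res) []

-- ===== PRECONDITION & SPEC =====
-- Pre_ excludes exactly num_ops < 0, where itertools.product(…, repeat=num_ops) raises ValueError.
def Pre_get_exprs (operators : List String) (operands : List String) (num_ops : Int) : Prop :=
  0 ≤ num_ops
instance (operators : List String) (operands : List String) (num_ops : Int) : Decidable (Pre_get_exprs operators operands num_ops) := by unfold Pre_get_exprs; infer_instance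

def pvWitness_get_exprs : List String × List String × Int := (["+", "*"], ["1", "2"], 1)

def Spec_get_exprs (operators : List String) (operands : List String) (num_ops : Int) (out : List String) : Prop := out = get_exprs_alt operators operands num_ops
instance (operators : List String) (operands : List String) (num_ops : Int) (out : List String) : Decidable (Spec_get_exprs operators operands num_ops out) := by unfold Spec_get_exprs; infer_instance

-- ===== CLAIM (what is proved, stated in full; the proofs are below) =====
def Claim_equal_get_exprs : Prop := ∀ (operators : List String) (operands : List String) (num_ops : Int), Dom_get_exprs operators operands num_ops → Pre_get_exprs operators operands num_ops → Spec_get_exprs operators operands num_ops (get_exprs operators operands num_ops)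

-- ===== LEMMAS AND PROOFS =====

lemma pyRange_two_nil {a b : Int} (h : b ≤ a) : PySem.List.pyRange a b 2 = [] := by
  rw [PySem.List.pyRange_of_pos _ _ (by omega), if_neg (by omega)]
  simp

lemma mkChild_length_lt (e : List String) (j : Int) (h1 : 1 ≤ j) (h2 : j < (e.length : Int)) :
    (mkChild e j).length < e.length := by
  unfold mkChild
  rw [PySem.List.slice_to e (by omega), PySem.List.slice_from e (by omega)]
  simp only [List.length_append, List.length_take, List.length_drop, List.length_cons,
    List.length_nil]
  omega

lemma wfW_pos (n : Nat) : 1 ≤ wfW n := by cases n <;> simp [wfW]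

lemma wfW_mono : ∀ {m n : Nat}, m ≤ n → wfW m ≤ wfW n := by
  intro m n h
  induction n with
  | zero => simp_all
  | succ k ih =>
    rcases Nat.lt_or_ge m (k + 1) with h' | h'
    · have := ih (by omega)
      have h1 := wfW_pos k
      calc wfW m ≤ wfW k := this
        _ ≤ (k + 1) * (wfW k + 1) + 1 := by nlinarith
        _ = wfW (k + 1) := by rw [wfW]
    · have hm : m = k + 1 := by omega
      rw [hm]

lemma wfW_key {k L : Nat} (hk : k ≤ L) : k * (1 + wfW (L - 1)) < wfW L := by
  cases L with
  | zero =>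
    have : k = 0 := by omega
    simp [this, wfW]
  | succ m =>
    have h1 : k * (1 + wfW m) ≤ (m + 1) * (1 + wfW m) := Nat.mul_le_mul_right _ hk
    have hw : wfW (m + 1) = (m + 1) * (wfW m + 1) + 1 := by rw [wfW]
    simp only [Nat.succ_sub_one, Nat.add_comm 1 (wfW m)] at h1 ⊢
    omega

lemma stackW_foldr (f : Int → String) (g : Int → List String) :
    ∀ (l : List Int) (rest : List WorkFrame),
      stackW (l.foldr (fun j st => WorkFrame.emit (f j) :: WorkFrame.eval (g j) :: st) rest)
        = (l.map (fun j => 1 + wfW (g j).length)).sum + stackW rest := by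
  intro l
  induction l with
  | nil => simp
  | cons j t ih =>
    intro rest
    have h := ih rest
    simp only [stackW] at h ⊢
    simp only [List.foldr_cons, List.map_cons, List.sum_cons, frameW]
    rw [h]
    omega

-- the pushed children weigh strictly less than the popped eval frame
lemma stackW_children (e : List String) (rest : List WorkFrame) :
    stackW ((PySem.List.pyRange 1 (e.length : Int) 2).reverse.foldl
      (fun st j => WorkFrame.emit (joinSp (mkChild e j)) :: WorkFrame.eval (mkChild e j) :: st) rest)
      < wfW e.length + stackW rest := by
  rw [List.foldl_reverse]
  rw [stackW_foldr (fun j => joinSp (mkChild e j)) (fun j => mkChild e j)]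
  have hbound : ∀ x ∈ (PySem.List.pyRange 1 (e.length : Int) 2).map
      (fun j => 1 + wfW (mkChild e j).length), x ≤ 1 + wfW (e.length - 1) := by
    intro x hx
    rcases List.mem_map.mp hx with ⟨j, hj, rfl⟩
    rcases (PySem.List.mem_pyRange_iff_of_pos (by omega) j).mp hj with ⟨h1, h2, _⟩
    have hlt := mkChild_length_lt e j h1 h2
    have := wfW_mono (show (mkChild e j).length ≤ e.length - 1 by omega)
    omega
  have hsum := List.sum_le_card_nsmul _ _ hbound
  rw [smul_eq_mul] at hsum
  have hlen : ((PySem.List.pyRange 1 (e.length : Int) 2).map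
      (fun j => 1 + wfW (mkChild e j).length)).length ≤ e.length := by
    rw [List.length_map, PySem.List.pyRange_of_pos _ _ (by omega), List.length_map,
      List.length_range]
    split <;> omega
  have hkey := wfW_key hlen
  omega

-- evalAF does not depend on the fuel once it exceeds the node size
lemma evalAF_congr : ∀ (n : Nat) (e : List String), e.length ≤ n →
    ∀ (f1 f2 : Nat), e.length < f1 → e.length < f2 → evalAF f1 e = evalAF f2 e := by
  intro n
  induction n with
  | zero =>
    intro e he f1 f2 h1 h2
    obtain ⟨a, rfl⟩ : ∃ a, f1 = a + 1 := ⟨f1 - 1, by omega⟩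
    obtain ⟨b, rfl⟩ : ∃ b, f2 = b + 1 := ⟨f2 - 1, by omega⟩
    have he0 : e.length = 0 := by omega
    have hr : PySem.List.pyRange 1 ((0 : Nat) : Int) 2 = [] := pyRange_two_nil (by simp)
    simp only [evalAF, he0, hr]
    simp
  | succ n ih =>
    intro e he f1 f2 h1 h2
    obtain ⟨a, rfl⟩ : ∃ a, f1 = a + 1 := ⟨f1 - 1, by omega⟩
    obtain ⟨b, rfl⟩ : ∃ b, f2 = b + 1 := ⟨f2 - 1, by omega⟩
    simp only [evalAF]
    by_cases h3 : e.length == 3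
    · rw [if_pos h3, if_pos h3]
    · rw [if_neg h3, if_neg h3]
      apply PySem.List.foldl_congr_mem
      intro acc j hj
      rcases (PySem.List.mem_pyRange_iff_of_pos (by omega) j).mp hj with ⟨hj1, hj2, _⟩
      have hlt := mkChild_length_lt e j hj1 hj2
      rw [ih (mkChild e j) (by omega) a b (by omega) (by omega)]

-- one unfolding of evaluate on a non-base node, as a flatMap over the child indices
lemma evalA_step (e : List String) (h3 : e.length ≠ 3) :
    evalA e = (PySem.List.pyRange 1 (e.length : Int) 2).flatMap
      (fun j => [joinSp (mkChild e j)] ++ evalA (mkChild e j)) := by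
  have hcongr : (PySem.List.pyRange 1 (e.length : Int) 2).foldl
        (fun res j => res ++ ([joinSp (mkChild e j)] ++ evalAF e.length (mkChild e j))) []
      = (PySem.List.pyRange 1 (e.length : Int) 2).foldl
        (fun res j => res ++ ([joinSp (mkChild e j)] ++ evalA (mkChild e j))) [] := by
    apply PySem.List.foldl_congr_mem
    intro acc j hj
    rcases (PySem.List.mem_pyRange_iff_of_pos (by omega) j).mp hj with ⟨hj1, hj2, _⟩
    have hlt := mkChild_length_lt e j hj1 hj2
    rw [evalA, evalAF_congr (mkChild e j).length (mkChild e j) le_rfl e.length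
      ((mkChild e j).length + 1) (by omega) (by omega)]
  conv_lhs => rw [evalA]
  rw [show evalAF (e.length + 1) e =
      (PySem.List.pyRange 1 (e.length : Int) 2).foldl
        (fun res j => res ++ ([joinSp (mkChild e j)] ++ evalAF e.length (mkChild e j))) [] by
    simp only [evalAF]
    rw [if_neg (by simpa using h3)]]
  rw [hcongr, PySem.List.foldl_append_eq_flatMap]
  simp

lemma evalA_three (e : List String) (h : e.length = 3) : evalA e = [joinSp e] := by
  unfold evalA
  simp only [evalAF]
  rw [if_pos (by simp [h])]

-- the strings an A-side evaluation of each stacked frame would produce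
def emitAll (st : List WorkFrame) : List String :=
  st.flatMap (fun fr => match fr with | WorkFrame.emit s => [s] | WorkFrame.eval e => evalA e)

lemma emitAll_foldr (e : List String) : ∀ (l : List Int) (rest : List WorkFrame),
    emitAll (l.foldr (fun j st =>
        WorkFrame.emit (joinSp (mkChild e j)) :: WorkFrame.eval (mkChild e j) :: st) rest)
      = l.flatMap (fun j => [joinSp (mkChild e j)] ++ evalA (mkChild e j)) ++ emitAll rest := by
  intro l
  induction l with
  | nil => simp
  | cons j t ih =>
    intro rest
    simp only [List.foldr_cons, List.flatMap_cons, emitAll, List.flatMap_cons] at ih ⊢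
    rw [ih rest]
    simp

-- the central invariant: with enough fuel, the stack loop appends exactly what A's
-- recursive evaluate would emit for the stacked frames
lemma runStackF_sound : ∀ (f : Nat) (stack : List WorkFrame) (res : List String),
    stackW stack ≤ f → runStackF f stack res = res ++ emitAll stack := by
  intro f
  induction f with
  | zero =>
    intro stack res hf
    cases stack with
    | nil => simp [runStackF, emitAll]
    | cons fr rest =>
      exfalso
      have : 1 ≤ frameW fr := by
        cases fr with
        | emit s => simp [frameW]
        | eval e => exact wfW_pos _
      simp only [stackW, List.map_cons, List.sum_cons] at hf
      omega
  | succ f ih =>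
    intro stack res hf
    cases stack with
    | nil => simp [runStackF, emitAll]
    | cons fr rest =>
      cases fr with
      | emit s =>
        simp only [stackW, List.map_cons, List.sum_cons, frameW] at hf
        rw [show runStackF (f + 1) (WorkFrame.emit s :: rest) res = runStackF f rest (res ++ [s]) from rfl,
          ih rest _ (by simp only [stackW]; omega)]
        simp [emitAll]
      | eval e =>
        simp only [stackW, List.map_cons, List.sum_cons, frameW] at hf
        by_cases h3 : e.length = 3
        · rw [show runStackF (f + 1) (WorkFrame.eval e :: rest) res =
              if e.length == 3 then runStackF f rest (res ++ [joinSp e])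
              else runStackF f ((PySem.List.pyRange 1 (e.length : Int) 2).reverse.foldl
                (fun st j => WorkFrame.emit (joinSp (mkChild e j)) :: WorkFrame.eval (mkChild e j) :: st) rest) res
            from rfl, if_pos (by simp [h3])]
          have h1 := wfW_pos e.length
          rw [ih rest _ (by simp only [stackW]; omega)]
          simp [emitAll, evalA_three e h3]
        · rw [show runStackF (f + 1) (WorkFrame.eval e :: rest) res =
              if e.length == 3 then runStackF f rest (res ++ [joinSp e])
              else runStackF f ((PySem.List.pyRange 1 (e.length : Int) 2).reverse.foldl
                (fun st j => WorkFrame.emit (joinSp (mkChild e j)) :: WorkFrame.eval (mkChild e j) :: st) rest) res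
            from rfl, if_neg (by simp [h3])]
          have hch := stackW_children e rest
          rw [ih _ _ (by simp only [stackW] at hch ⊢; omega)]
          rw [List.foldl_reverse, emitAll_foldr e _ rest]
          have hstep := evalA_step e h3
          simp only [emitAll, List.flatMap_cons, hstep]

lemma run_eval_singleton (e : List String) (res : List String) :
    runStackF (stackW [WorkFrame.eval e]) [WorkFrame.eval e] res = res ++ evalA e := by
  rw [runStackF_sound _ _ _ le_rfl]
  simp [emitAll]

-- ===== VERDICT (by name: the statement is the Claim_ definition above) =====
theorem get_exprs_spec : Claim_equal_get_exprs := by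
  intro operators operands num_ops _ _
  unfold Spec_get_exprs get_exprs get_exprs_alt
  have inner : ∀ (ops : List String) (l : List (List String)) (res : List String),
      l.foldl (fun res opers => res ++ evalA (buildExpr ops opers)) res
      = l.foldl (fun res opers => runStackF (stackW [WorkFrame.eval (buildExpr ops opers)])
          [WorkFrame.eval (buildExpr ops opers)] res) res := by
    intro ops l
    induction l with
    | nil => intro res; rfl
    | cons p t ih => intro res; simp only [List.foldl_cons, run_eval_singleton, ih]
  have outer : ∀ (l : List (List String)) (res : List String),
      l.foldl (fun res ops => (comb operands (num_ops + 1)).foldl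
        (fun res opers => res ++ evalA (buildExpr ops opers)) res) res
      = l.foldl (fun res ops => (comb operands (num_ops + 1)).foldl
        (fun res opers => runStackF (stackW [WorkFrame.eval (buildExpr ops opers)])
          [WorkFrame.eval (buildExpr ops opers)] res) res) res := by
    intro l
    induction l with
    | nil => intro res; rfl
    | cons o t ih =>
      intro res
      rw [List.foldl_cons, List.foldl_cons, inner, ih]
  exact outer _ []
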